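-- pv_equiv track=rewrite | github.com/shuoshuc/astra-sim-artifacts | tools/place.py | init_job_blocks
-- ===== SOURCE A (Python) =====
-- import itertools
--
-- def init_job_blocks(jobs, B):
--     """
--     For each job, breaks it into BxBxB blocks and returns a dictionary mapping job names to list of lists of node indices.
--     The job shape is denoted by (D, T, P) where D is DP degree, T is TP degree, and P is PP degree.
--     Node index in a job also follow plane-major ordering.
--     """
--     job_blocks = {}
--     for name, dims in jobs.items():
--         D, T, P = dims
--         job_block_indices = []
--
--         for p_start, t_start, d_start in itertools.product(
--             range(0, P, B), range(0, T, B), range(0, D, B)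
--         ):
--             block = []
--             for p, t, d in itertools.product(
--                 range(p_start, p_start + B),
--                 range(t_start, t_start + B),
--                 range(d_start, d_start + B),
--             ):
--                 block.append(p * (T * D) + t * D + d)
--             job_block_indices.append(block)
--         job_blocks[name] = job_block_indices
--
--     return job_blocks
-- ===== SOURCE B (Python) =====
-- def init_job_blocks(jobs, B):
--     """
--     For each job, break it into BxBxB blocks (plane-major ordering).
--     Scatter re-implementation: pre-create one empty bucket per block, then make
--     a single flat pass over every cell (p, t, d) of the block-padded grid in
--     global plane-major order, routing each cell's linear index to its block's
--     bucket via floor-division bucketing (p - p % B, ...).  Within a bucket,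
--     cells arrive in (p, t, d)-lexicographic order, which is exactly the
--     per-block product order of the gather formulation.
--     """
--     job_blocks = {}
--     for name, (D, T, P) in jobs.items():
--         starts = [(p0, t0, d0)
--                   for p0 in range(0, P, B)
--                   for t0 in range(0, T, B)
--                   for d0 in range(0, D, B)]
--         buckets = {s: [] for s in starts}
--         nP = len(range(0, P, B)) * B
--         nT = len(range(0, T, B)) * B
--         nD = len(range(0, D, B)) * B
--         if starts:
--             for p in range(nP):
--                 for t in range(nT):
--                     for d in range(nD):
--                         buckets[(p - p % B, t - t % B, d - d % B)].append(p * (T * D) + t * D + d)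
--         job_blocks[name] = [buckets[s] for s in starts]
--     return job_blocks
-- ===== Notes on version B (the rewrite author's own statement) =====
-- stated objective: alternative
-- what changed: A gathers each block by recomputing p*(T*D)+t*D+d inside six nested loops per block; B inverts the traversal: it pre-creates one empty bucket per block and makes a single flat pass over the padded grid, scattering each cell's linear index into its block's bucket keyed by floor-division bucketing (p - p%B, t - t%B, d - d%B).
import Mathlib
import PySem

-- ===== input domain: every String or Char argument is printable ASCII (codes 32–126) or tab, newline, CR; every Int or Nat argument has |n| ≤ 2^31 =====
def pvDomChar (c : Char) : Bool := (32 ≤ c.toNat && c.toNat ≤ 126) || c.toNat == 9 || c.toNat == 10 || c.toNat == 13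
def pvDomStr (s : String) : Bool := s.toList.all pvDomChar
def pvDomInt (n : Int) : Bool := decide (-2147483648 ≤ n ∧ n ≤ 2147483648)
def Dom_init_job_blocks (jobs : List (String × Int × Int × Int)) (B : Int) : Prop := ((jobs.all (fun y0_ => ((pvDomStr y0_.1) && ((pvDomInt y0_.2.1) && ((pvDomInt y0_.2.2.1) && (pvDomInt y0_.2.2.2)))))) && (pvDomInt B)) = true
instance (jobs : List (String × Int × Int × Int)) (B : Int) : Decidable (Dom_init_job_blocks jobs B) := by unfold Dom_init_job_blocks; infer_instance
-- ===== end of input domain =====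

-- B replaces A's per-block gather (six nested loops recomputing each index inside every block) by a
-- scatter: pre-created per-block buckets, then one flat pass over the padded grid routing each cell's
-- linear index to its bucket by floor-division bucketing (alternative algorithm, same asymptotic cost).


-- ===== PORT A =====
-- itertools.product(r1, r2, r3)
def pvProd3 (xs ys zs : List Int) : List (Int × Int × Int) :=
  xs.flatMap fun x => ys.flatMap fun y => zs.map fun z => (x, y, z)

-- the per-job loop body of A: gather each block, recomputing p*(T*D)+t*D+d in the inner product
def pvBlocksA (D T P B : Int) : List (List Int) :=
  (pvProd3 (PySem.List.pyRange 0 P B) (PySem.List.pyRange 0 T B)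
      (PySem.List.pyRange 0 D B)).foldl
    (fun acc s =>
      acc ++ [(pvProd3 (PySem.List.pyRange s.1 (s.1 + B) 1)
                 (PySem.List.pyRange s.2.1 (s.2.1 + B) 1)
                 (PySem.List.pyRange s.2.2 (s.2.2 + B) 1)).foldl
          (fun blk q => blk ++ [q.1 * (T * D) + q.2.1 * D + q.2.2]) []]) []

def init_job_blocks (jobs : List (String × Int × Int × Int)) (B : Int) : List (String × List (List Int)) :=
  jobs.foldl (fun acc j => acc ++ [(j.1, pvBlocksA j.2.1 j.2.2.1 j.2.2.2 B)]) []

-- ===== PORT B =====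
-- the per-job body of B: pre-create one empty bucket per block start, then a single flat pass over
-- the padded grid scatters each cell's linear index into the bucket keyed by (p - p%B, t - t%B, d - d%B)
def pvBlocksAlt (D T P B : Int) : List (List Int) :=
  let starts := (PySem.List.pyRange 0 P B).flatMap fun p0 =>
    (PySem.List.pyRange 0 T B).flatMap fun t0 =>
      (PySem.List.pyRange 0 D B).map fun d0 => ((p0, t0, d0) : Int × Int × Int)
  let buckets0 : PySem.Dict (Int × Int × Int) (List Int) :=
    starts.foldl (fun dct s => dct.insert s []) PySem.Dict.empty
  let nP : Int := ((PySem.List.pyRange 0 P B).length : Int) * B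
  let nT : Int := ((PySem.List.pyRange 0 T B).length : Int) * B
  let nD : Int := ((PySem.List.pyRange 0 D B).length : Int) * B
  let buckets := if starts = [] then buckets0 else
    ((PySem.List.pyRange 0 nP 1).flatMap fun p =>
      (PySem.List.pyRange 0 nT 1).flatMap fun t =>
        (PySem.List.pyRange 0 nD 1).map fun d => ((p, t, d) : Int × Int × Int)).foldl
    (fun dct c =>
      dct.modify (c.1 - PySem.Int.mod c.1 B, c.2.1 - PySem.Int.mod c.2.1 B,
          c.2.2 - PySem.Int.mod c.2.2 B) []
          (fun l => l ++ [c.1 * (T * D) + c.2.1 * D + c.2.2])) buckets0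
  starts.map fun s => buckets.getD s []

def init_job_blocks_alt (jobs : List (String × Int × Int × Int)) (B : Int) : List (String × List (List Int)) :=
  jobs.map fun j => (j.1, pvBlocksAlt j.2.1 j.2.2.1 j.2.2.2 B)

-- ===== PRECONDITION & SPEC =====
-- B = 0 makes range(0, P, 0) raise ValueError in both programs; excluded.
def Pre_init_job_blocks (jobs : List (String × Int × Int × Int)) (B : Int) : Prop := B ≠ 0
instance (jobs : List (String × Int × Int × Int)) (B : Int) : Decidable (Pre_init_job_blocks jobs B) := by unfold Pre_init_job_blocks; infer_instance
def pvWitness_init_job_blocks : (List (String × Int × Int × Int)) × Int := ([("j", 2, 2, 2)], 2)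

def Spec_init_job_blocks (jobs : List (String × Int × Int × Int)) (B : Int) (out : List (String × List (List Int))) : Prop := out = init_job_blocks_alt jobs B
instance (jobs : List (String × Int × Int × Int)) (B : Int) (out : List (String × List (List Int))) : Decidable (Spec_init_job_blocks jobs B out) := by unfold Spec_init_job_blocks; infer_instance

-- ===== CLAIM (what is proved, stated in full; the proofs are below) =====
def Claim_equal_init_job_blocks : Prop := ∀ (jobs : List (String × Int × Int × Int)) (B : Int), Dom_init_job_blocks jobs B → Pre_init_job_blocks jobs B → Spec_init_job_blocks jobs B (init_job_blocks jobs B)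

-- ===== LEMMAS AND PROOFS =====

-- the (bucket key, linear index) pair computed for a cell by B's scatter loop (proof-side helper)
def pvPairF (T D B : Int) (c : Int × Int × Int) : (Int × Int × Int) × Int :=
  ((c.1 - PySem.Int.mod c.1 B, c.2.1 - PySem.Int.mod c.2.1 B, c.2.2 - PySem.Int.mod c.2.2 B),
   c.1 * (T * D) + c.2.1 * D + c.2.2)

-- pre-creating buckets with value [] leaves every getD at default [] equal to []
lemma getD_fold_insert_nil (l : List (Int × Int × Int))
    (d : PySem.Dict (Int × Int × Int) (List Int)) (h : ∀ k, d.getD k [] = [])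
    (k : Int × Int × Int) : (l.foldl (fun dct s => dct.insert s []) d).getD k [] = [] := by
  induction l generalizing d with
  | nil => exact h k
  | cons hd tl ih =>
    refine ih _ (fun k' => ?_)
    by_cases hk : k' = hd
    · subst hk; exact PySem.Dict.getD_insert_self d k' [] []
    · rw [PySem.Dict.getD_insert_of_ne d [] [] hk]; exact h k'

-- the scatter fold's bucket content: the cells routed to key s, in traversal order
lemma scatter_getD (T D B : Int) (cells : List (Int × Int × Int))
    (d0 : PySem.Dict (Int × Int × Int) (List Int)) (s : Int × Int × Int) :
    (cells.foldl (fun dct c =>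
        dct.modify (c.1 - PySem.Int.mod c.1 B, c.2.1 - PySem.Int.mod c.2.1 B,
            c.2.2 - PySem.Int.mod c.2.2 B) []
          (fun l => l ++ [c.1 * (T * D) + c.2.1 * D + c.2.2])) d0).getD s []
      = d0.getD s []
        ++ (cells.filter (fun c => ((c.1 - PySem.Int.mod c.1 B, c.2.1 - PySem.Int.mod c.2.1 B,
              c.2.2 - PySem.Int.mod c.2.2 B) : Int × Int × Int) == s)).map
            (fun c => c.1 * (T * D) + c.2.1 * D + c.2.2) := by
  have h := PySem.Dict.getD_foldl_modify_append (cells.map (pvPairF T D B)) d0 s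
  rw [List.foldl_map, List.filter_map, List.map_map] at h
  simpa [pvPairF, Function.comp_def] using h

-- middle layer of the componentwise filter of a triple comprehension
lemma filter_trip_mid (x : Int) (ys zs : List Int) (pP pT pD : Int → Bool) :
    ((ys.flatMap fun y => zs.map fun z => ((x, y, z) : Int × Int × Int)).filter
        (fun c => pP c.1 && (pT c.2.1 && pD c.2.2)))
      = if pP x then (ys.filter pT).flatMap fun y => (zs.filter pD).map fun z => (x, y, z)
        else [] := by
  induction ys with
  | nil => by_cases hx : pP x <;> simp [hx]
  | cons y ys ih =>
    rw [List.flatMap_cons, List.filter_append, ih, List.filter_map]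
    by_cases hx : pP x <;> by_cases hy : pT y <;>
      simp [hx, hy, Function.comp_def]

-- a triple comprehension filtered by a componentwise predicate is the product of the filtered lists
lemma filter_trip (xs ys zs : List Int) (pP pT pD : Int → Bool) :
    ((xs.flatMap fun x => ys.flatMap fun y => zs.map fun z => ((x, y, z) : Int × Int × Int)).filter
        (fun c => pP c.1 && (pT c.2.1 && pD c.2.2)))
      = (xs.filter pP).flatMap fun x => (ys.filter pT).flatMap fun y =>
          (zs.filter pD).map fun z => (x, y, z) := by
  induction xs with
  | nil => simp
  | cons x xs ih =>
    rw [List.flatMap_cons, List.filter_append, ih, filter_trip_mid, List.filter_cons]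
    by_cases hx : pP x <;> simp [hx]

-- the cells of the padded axis [0, n*B) whose bucket coordinate is B*i form exactly the i-th chunk
lemma chunk_filter (B : Int) (hB : 0 < B) (n i : Nat) (hi : i < n) :
    (PySem.List.pyRange 0 ((n : Int) * B) 1).filter
        (fun p => decide (p - PySem.Int.mod p B = B * (i : Int)))
      = PySem.List.pyRange (B * (i : Int)) (B * (i : Int) + B) 1 := by
  have hc0 : (0 : Int) ≤ B * (i : Int) := by positivity
  have hcn : B * (i : Int) + B ≤ (n : Int) * B := by
    have h1 : ((i : Int) + 1) ≤ (n : Int) := by exact_mod_cast hi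
    nlinarith
  rw [PySem.List.pyRange_one_append 0 (B * (i : Int)) ((n : Int) * B) hc0 (by linarith),
    PySem.List.pyRange_one_append (B * (i : Int)) (B * (i : Int) + B) ((n : Int) * B)
      (by linarith) hcn,
    List.filter_append, List.filter_append]
  have h1 : (PySem.List.pyRange 0 (B * (i : Int)) 1).filter
      (fun p => decide (p - PySem.Int.mod p B = B * (i : Int))) = [] := by
    refine List.filter_eq_nil_iff.mpr (fun p hp => ?_)
    rcases (PySem.List.mem_pyRange_one).mp hp with ⟨_, hlt⟩
    have := PySem.Int.mod_nonneg p hB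
    simp only [decide_eq_true_eq]
    omega
  have h2 : (PySem.List.pyRange (B * (i : Int)) (B * (i : Int) + B) 1).filter
      (fun p => decide (p - PySem.Int.mod p B = B * (i : Int)))
      = PySem.List.pyRange (B * (i : Int)) (B * (i : Int) + B) 1 := by
    refine List.filter_eq_self.mpr (fun p hp => ?_)
    rcases (PySem.List.mem_pyRange_one).mp hp with ⟨hge, hlt⟩
    have hm : PySem.Int.mod p B = p - B * (i : Int) := by
      rw [PySem.Int.mod_eq_emod_of_pos hB]
      have he := Int.add_mul_emod_self_left (p - B * (i : Int)) B (i : Int)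
      rw [show p - B * (i : Int) + B * (i : Int) = p by ring] at he
      rw [he, Int.emod_eq_of_lt (by omega) (by omega)]
    simp [hm]
  have h3 : (PySem.List.pyRange (B * (i : Int) + B) ((n : Int) * B) 1).filter
      (fun p => decide (p - PySem.Int.mod p B = B * (i : Int))) = [] := by
    refine List.filter_eq_nil_iff.mpr (fun p hp => ?_)
    rcases (PySem.List.mem_pyRange_one).mp hp with ⟨hge, _⟩
    have := PySem.Int.mod_lt p hB
    simp only [decide_eq_true_eq]
    omega
  rw [h1, h2, h3, List.nil_append, List.append_nil]

-- one axis: the padded-axis cells bucketed at a start p0 of range(0, P, B) are [p0, p0+B)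
lemma axis_filter (B P p0 : Int) (hB : 0 < B)
    (hp0 : p0 ∈ PySem.List.pyRange 0 P B) :
    (PySem.List.pyRange 0 (((PySem.List.pyRange 0 P B).length : Int) * B) 1).filter
        (fun p => decide (p - PySem.Int.mod p B = p0))
      = PySem.List.pyRange p0 (p0 + B) 1 := by
  rw [PySem.List.pyRange_of_pos 0 P hB] at hp0 ⊢
  rcases List.mem_map.mp hp0 with ⟨k, hk, rfl⟩
  rw [List.length_map, List.length_range]
  rw [List.mem_range] at hk
  simpa [zero_add] using chunk_filter B hB _ k hk

-- ===== VERDICT (by name: the statement is the Claim_ definition above) =====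
theorem init_job_blocks_spec : Claim_equal_init_job_blocks := by
  intro jobs B _ hB
  unfold Spec_init_job_blocks init_job_blocks init_job_blocks_alt
  rw [PySem.List.foldl_append_singleton_eq_map, List.nil_append]
  refine List.map_congr_left (fun j _ => ?_)
  -- per-job equality of gather (A) and scatter (B)
  congr 1
  generalize j.2.1 = D; generalize j.2.2.1 = T; generalize j.2.2.2 = P
  unfold pvBlocksA pvBlocksAlt
  simp only [PySem.List.foldl_append_singleton_eq_map, List.nil_append, pvProd3]
  by_cases hstart : ((PySem.List.pyRange 0 P B).flatMap fun p0 =>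
      (PySem.List.pyRange 0 T B).flatMap fun t0 =>
        (PySem.List.pyRange 0 D B).map fun d0 => ((p0, t0, d0) : Int × Int × Int)) = []
  · simp [hstart]
  · rw [if_neg hstart]
    refine List.map_congr_left (fun s hs => ?_)
    rw [scatter_getD, getD_fold_insert_nil _ _ (fun k => rfl), List.nil_append]
    -- decompose the membership of the start s
    rcases List.mem_flatMap.mp hs with ⟨p0, hp0, hs⟩
    rcases List.mem_flatMap.mp hs with ⟨t0, ht0, hs⟩
    rcases List.mem_map.mp hs with ⟨d0, hd0, rfl⟩
    dsimp only
    rcases lt_or_gt_of_ne hB with hneg | hpos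
    · -- B < 0: every block is empty on both sides
      have hP : (((PySem.List.pyRange 0 P B).length : Int) * B) ≤ 0 :=
        mul_nonpos_of_nonneg_of_nonpos (by positivity) hneg.le
      rw [PySem.List.pyRange_one_eq_nil (show p0 + B ≤ p0 by linarith),
        PySem.List.pyRange_one_eq_nil hP]
      simp
    · -- B > 0: componentwise filtering yields exactly the block's product of ranges
      have hpred : (fun c : Int × Int × Int =>
          (((c.1 - PySem.Int.mod c.1 B, c.2.1 - PySem.Int.mod c.2.1 B,
              c.2.2 - PySem.Int.mod c.2.2 B) : Int × Int × Int) == (p0, t0, d0)))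
          = (fun c : Int × Int × Int => decide (c.1 - PySem.Int.mod c.1 B = p0) &&
              (decide (c.2.1 - PySem.Int.mod c.2.1 B = t0) &&
               decide (c.2.2 - PySem.Int.mod c.2.2 B = d0))) := by
        funext c
        rw [Bool.eq_iff_iff]
        simp [Prod.ext_iff]
      rw [hpred, filter_trip _ _ _ (fun p => decide (p - PySem.Int.mod p B = p0))
          (fun t => decide (t - PySem.Int.mod t B = t0))
          (fun d => decide (d - PySem.Int.mod d B = d0)),
        axis_filter B P p0 hpos hp0, axis_filter B T t0 hpos ht0, axis_filter B D d0 hpos hd0]
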